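-- pv_equiv track=rewrite | github.com/changshengEVA/M-Agent | src/m_agent/memory/memory_core/workflow/build/entity_segment_merge.py | canonical_field_group
-- ===== SOURCE A (Python) =====
-- from typing import Any, Dict, List, Tuple
--
-- _FIELD_SYNONYMS: Tuple[Tuple[str, Tuple[str, ...]], ...] = (
--     ("hobby", ("hobby", "hobbies", "interests", "likes", "interest")),
--     ("age", ("age", "age_group", "age_range")),
--     ("occupation", ("occupation", "job", "work", "career")),
--     ("location", ("location", "place", "city", "country")),
-- )
--
-- def canonical_field_group(field: str) -> List[str]:
--     f = str(field or "").strip().lower()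
--     if not f:
--         return []
--     for canon, syns in _FIELD_SYNONYMS:
--         if f == canon or f in syns:
--             return list(dict.fromkeys([canon, *syns]))
--     return [f]
-- ===== SOURCE B (Python) =====
-- from typing import List
--
-- _FIELD_SYNONYMS = (
--     ("hobby", ("hobby", "hobbies", "interests", "likes", "interest")),
--     ("age", ("age", "age_group", "age_range")),
--     ("occupation", ("occupation", "job", "work", "career")),
--     ("location", ("location", "place", "city", "country")),
-- )
--
-- # Flat concatenation of all (deduplicated) groups, plus the offsets where each
-- # group starts: a sorted offset table replaces per-call group scanning.
-- _FLAT: List[str] = []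
-- _STARTS: List[int] = [0]
-- for _canon, _syns in _FIELD_SYNONYMS:
--     for _s in dict.fromkeys([_canon, *_syns]):
--         _FLAT.append(_s)
--     _STARTS.append(len(_FLAT))
--
--
-- def _group_of(f: str) -> List[str]:
--     try:
--         i = _FLAT.index(f)
--     except ValueError:
--         return [f]
--     # binary search on the offset table for the group containing position i
--     lo, hi = 0, len(_STARTS) - 1
--     while hi - lo > 1:
--         mid = (lo + hi) // 2
--         if _STARTS[mid] <= i:
--             lo = mid
--         else:
--             hi = mid
--     return _FLAT[_STARTS[lo]:_STARTS[lo + 1]]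
--
--
-- def canonical_field_group(field: str) -> List[str]:
--     f = str(field or "").strip().lower()
--     if not f:
--         return []
--     return _group_of(f)
-- ===== Notes on version B (the rewrite author's own statement) =====
-- stated objective: alternative
-- what changed: Replaces A's per-call scan over synonym groups (membership test per group) with a module-level flat concatenation of all groups plus an offset table: the function does one list.index on the flat list and a binary search on the offsets to slice out the group.
import Mathlib
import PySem

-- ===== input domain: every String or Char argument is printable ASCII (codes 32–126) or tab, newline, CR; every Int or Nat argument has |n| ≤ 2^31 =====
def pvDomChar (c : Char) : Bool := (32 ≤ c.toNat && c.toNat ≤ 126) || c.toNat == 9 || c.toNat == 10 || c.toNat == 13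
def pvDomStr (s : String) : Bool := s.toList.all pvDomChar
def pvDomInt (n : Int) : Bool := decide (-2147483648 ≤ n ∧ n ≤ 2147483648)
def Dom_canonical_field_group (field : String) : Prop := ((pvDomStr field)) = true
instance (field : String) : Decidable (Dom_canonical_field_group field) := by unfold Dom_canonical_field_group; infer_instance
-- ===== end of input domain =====

-- B replaces A's per-call scan over the synonym groups by a flat concatenation of all
-- groups with an offset table built once at module scope: one list.index plus a binary
-- search on the offsets picks the group slice (alternative algorithm; same behaviour).

-- module-level constant _FIELD_SYNONYMS shared by both sources
def pvFieldSynonyms : List (String × List String) :=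
  [("hobby", ["hobby", "hobbies", "interests", "likes", "interest"]),
   ("age", ["age", "age_group", "age_range"]),
   ("occupation", ["occupation", "job", "work", "career"]),
   ("location", ["location", "place", "city", "country"])]

-- ===== PORT A =====
-- the for-loop over _FIELD_SYNONYMS (returns [f] when it falls through)
def pvLoopA (f : String) : List (String × List String) → List String
  | [] => [f]
  | (canon, syns) :: rest =>
      if f == canon || syns.contains f then PySem.List.dedup (canon :: syns)
      else pvLoopA f rest

def canonical_field_group (field : String) : List String :=
  let f := PySem.Str.lower (PySem.Str.strip (if field == "" then "" else field))
  if f == "" then [] else pvLoopA f pvFieldSynonyms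

-- ===== PORT B =====
-- module-level build loop: _FLAT (all groups concatenated) and _STARTS (group offsets)
def pvFlatStarts : List String × List Int :=
  pvFieldSynonyms.foldl
    (fun st p =>
      let flat := st.1 ++ PySem.List.dedup (p.1 :: p.2)
      (flat, st.2 ++ [PySem.List.len flat]))
    ([], [0])

def pvFlat : List String := pvFlatStarts.1
def pvStarts : List Int := pvFlatStarts.2

-- the while-loop binary search on _STARTS for the group containing flat position i
-- (structural fuel = hi - lo, an upper bound on the iteration count of the Python loop)
def pvBSearchGo (starts : List Int) (i : Int) : Nat → Nat → Nat → Nat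
  | 0, lo, _ => lo
  | fuel + 1, lo, hi =>
      if hi - lo > 1 then
        let mid := (lo + hi) / 2  -- Nat division: exact for Python's (lo + hi) // 2, lo hi ≥ 0
        if PySem.List.pyGetD starts (mid : Int) 0 ≤ i then pvBSearchGo starts i fuel mid hi
        else pvBSearchGo starts i fuel lo mid
      else lo

def pvBSearch (starts : List Int) (i : Int) (lo hi : Nat) : Nat :=
  pvBSearchGo starts i (hi - lo) lo hi

-- helper _group_of: try _FLAT.index(f) / except return [f]; binary search; slice
def pvGroupOf (f : String) : List String :=
  match PySem.List.index? pvFlat f with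
  | none => [f]
  | some i =>
      let lo := pvBSearch pvStarts (i : Int) 0 (pvStarts.length - 1)
      PySem.List.slice pvFlat (some (PySem.List.pyGetD pvStarts (lo : Int) 0))
        (some (PySem.List.pyGetD pvStarts ((lo : Int) + 1) 0))

def canonical_field_group_alt (field : String) : List String :=
  let f := PySem.Str.lower (PySem.Str.strip (if field == "" then "" else field))
  if f == "" then [] else pvGroupOf f

-- ===== PRECONDITION & SPEC =====
def Spec_canonical_field_group (field : String) (out : List String) : Prop := out = canonical_field_group_alt field
instance (field : String) (out : List String) : Decidable (Spec_canonical_field_group field out) := by unfold Spec_canonical_field_group; infer_instance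

-- ===== CLAIM (what is proved, stated in full; the proofs are below) =====
def Claim_equal_canonical_field_group : Prop := ∀ (field : String), Dom_canonical_field_group field → Spec_canonical_field_group field (canonical_field_group field)

-- ===== LEMMAS AND PROOFS =====

-- the module-level build loop evaluated
lemma pvFlat_eq : pvFlat =
    ["hobby", "hobbies", "interests", "likes", "interest",
     "age", "age_group", "age_range",
     "occupation", "job", "work", "career",
     "location", "place", "city", "country"] := by decide

-- the scan and the flat-index-plus-binary-search agree on every normalised key f
lemma pvLoop_eq_flat (f : String) :
    pvLoopA f pvFieldSynonyms = pvGroupOf f := by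
  by_cases h0 : f = "hobby"
  · subst h0; decide
  by_cases h1 : f = "hobbies"
  · subst h1; decide
  by_cases h2 : f = "interests"
  · subst h2; decide
  by_cases h3 : f = "likes"
  · subst h3; decide
  by_cases h4 : f = "interest"
  · subst h4; decide
  by_cases h5 : f = "age"
  · subst h5; decide
  by_cases h6 : f = "age_group"
  · subst h6; decide
  by_cases h7 : f = "age_range"
  · subst h7; decide
  by_cases h8 : f = "occupation"
  · subst h8; decide
  by_cases h9 : f = "job"
  · subst h9; decide
  by_cases h10 : f = "work"
  · subst h10; decide
  by_cases h11 : f = "career"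
  · subst h11; decide
  by_cases h12 : f = "location"
  · subst h12; decide
  by_cases h13 : f = "place"
  · subst h13; decide
  by_cases h14 : f = "city"
  · subst h14; decide
  by_cases h15 : f = "country"
  · subst h15; decide
  have hnone : PySem.List.index? pvFlat f = none := by
    rw [PySem.List.index?_eq_none_iff, pvFlat_eq]
    simp [h0, h1, h2, h3, h4, h5, h6, h7, h8, h9, h10, h11, h12, h13, h14, h15]
  unfold pvGroupOf
  rw [hnone]
  simp [pvLoopA, pvFieldSynonyms,
    h0, h1, h2, h3, h4, h5, h6, h7, h8, h9, h10, h11, h12, h13, h14, h15]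

-- ===== VERDICT (by name: the statement is the Claim_ definition above) =====
theorem canonical_field_group_spec : Claim_equal_canonical_field_group := by
  intro field _
  show canonical_field_group field = canonical_field_group_alt field
  have key : ∀ (g : String),
      (if (g == "") = true then ([] : List String) else pvLoopA g pvFieldSynonyms) =
        (if (g == "") = true then [] else pvGroupOf g) := by
    intro g
    by_cases hg : (g == "") = true
    · rw [if_pos hg, if_pos hg]
    · rw [if_neg hg, if_neg hg]
      exact pvLoop_eq_flat g
  exact key (PySem.Str.lower (PySem.Str.strip (if field == "" then "" else field)))
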